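-- pv_equiv track=rewrite | github.com/lakshya503/Data-science-fundamentals-Dataquest | python-intermediate/Date Operations-302.py | organize_by_month
-- ===== SOURCE A (Python) =====
-- def organize_by_month(cleaned_music):
--     months = [1,2,3,4,5,6,7,8,9,10,11,12]
--
--     organized = dict()
--     for month in months:
--         tracks_in_month = []
--         for track in cleaned_music:
--             if track[-2] == month:
--                 tracks_in_month.append(track)
--         organized[month] = tracks_in_month
--     return organized
-- ===== SOURCE B (Python) =====
-- def organize_by_month(cleaned_music):
--     organized = {m: [] for m in range(1, 13)}
--     for track in cleaned_music:
--         month = track[-2]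
--         if month in organized:
--             organized[month].append(track)
--     return organized
-- ===== Notes on version B (the rewrite author's own statement) =====
-- stated objective: alternative
-- what changed: Replaces twelve filtering scans of the track list (one per month) by a single bucketing pass that appends each track to a pre-initialized month bucket, dropping out-of-range months via the membership guard exactly as A does.
import Mathlib
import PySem

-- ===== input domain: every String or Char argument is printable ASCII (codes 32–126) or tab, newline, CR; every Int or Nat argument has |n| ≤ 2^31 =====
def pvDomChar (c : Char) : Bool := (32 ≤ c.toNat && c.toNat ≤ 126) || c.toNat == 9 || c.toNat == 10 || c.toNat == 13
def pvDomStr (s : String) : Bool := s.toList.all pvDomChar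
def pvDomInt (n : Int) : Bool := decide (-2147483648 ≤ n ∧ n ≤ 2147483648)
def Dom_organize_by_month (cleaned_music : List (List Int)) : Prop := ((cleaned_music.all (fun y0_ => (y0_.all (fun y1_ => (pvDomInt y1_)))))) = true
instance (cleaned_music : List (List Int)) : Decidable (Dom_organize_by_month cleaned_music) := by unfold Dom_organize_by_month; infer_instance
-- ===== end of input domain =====

-- B replaces A's twelve filtering scans by one bucketing pass into pre-initialized month buckets.

-- ===== PORT A =====
-- months = [1..12]
def pvMonths : List Int := [1, 2, 3, 4, 5, 6, 7, 8, 9, 10, 11, 12]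

-- for month in months: scan cleaned_music, collect matching tracks, organized[month] = …
-- (the month keys are fresh and distinct, so each dict insertion appends a new entry)
def organize_by_month (cleaned_music : List (List Int)) : List (Int × List (List Int)) :=
  pvMonths.foldl
    (fun organized month =>
      organized ++ [(month,
        cleaned_music.foldl
          (fun tracks_in_month track =>
            if PySem.List.pyGet? track (-2) == some month then tracks_in_month ++ [track]
            else tracks_in_month)
          [])])
    []

-- ===== PORT B =====
-- one step of B's loop: month = track[-2]; if month in organized: organized[month].append(track)
def pvBStep (organized : List (Int × List (List Int))) (track : List Int) :
    List (Int × List (List Int)) :=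
  match PySem.List.pyGet? track (-2) with
  | none => organized  -- Python raises IndexError here; excluded by Pre_
  | some month =>
    if organized.any (fun p => p.1 == month) then
      organized.map (fun p => if p.1 == month then (p.1, p.2 ++ [track]) else p)
    else organized

-- organized = {m: [] for m in range(1,13)}; then one pass over cleaned_music
def organize_by_month_alt (cleaned_music : List (List Int)) : List (Int × List (List Int)) :=
  cleaned_music.foldl pvBStep (pvMonths.map (fun m => (m, ([] : List (List Int)))))

-- ===== PRECONDITION & SPEC =====
-- Pre_ excludes tracks with fewer than 2 elements, on which track[-2] raises IndexError in both A and B.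
def Pre_organize_by_month (cleaned_music : List (List Int)) : Prop :=
  ∀ t ∈ cleaned_music, 2 ≤ t.length
instance (cleaned_music : List (List Int)) : Decidable (Pre_organize_by_month cleaned_music) := by
  unfold Pre_organize_by_month; infer_instance

def pvWitness_organize_by_month : List (List Int) := [[10, 3, 200], [11, 12, 50], [7, 99]]

def Spec_organize_by_month (cleaned_music : List (List Int)) (out : List (Int × List (List Int))) : Prop := out = organize_by_month_alt cleaned_music
instance (cleaned_music : List (List Int)) (out : List (Int × List (List Int))) : Decidable (Spec_organize_by_month cleaned_music out) := by unfold Spec_organize_by_month; infer_instance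

-- ===== CLAIM (what is proved, stated in full; the proofs are below) =====
def Claim_equal_organize_by_month : Prop := ∀ (cleaned_music : List (List Int)), Dom_organize_by_month cleaned_music → Pre_organize_by_month cleaned_music → Spec_organize_by_month cleaned_music (organize_by_month cleaned_music)

-- ===== LEMMAS AND PROOFS =====

-- the canonical value both ports compute
def pvFilt (cleaned_music : List (List Int)) (m : Int) : List (List Int) :=
  cleaned_music.filter (fun t => PySem.List.pyGet? t (-2) == some m)

theorem pvA_canon (cleaned_music : List (List Int)) :
    organize_by_month cleaned_music = pvMonths.map (fun m => (m, pvFilt cleaned_music m)) := by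
  unfold organize_by_month
  have h : ∀ (ms : List Int) (acc : List (Int × List (List Int))),
      ms.foldl
        (fun organized month =>
          organized ++ [(month,
            cleaned_music.foldl
              (fun tracks_in_month track =>
                if PySem.List.pyGet? track (-2) == some month then tracks_in_month ++ [track]
                else tracks_in_month)
              [])])
        acc = acc ++ ms.map (fun m => (m, pvFilt cleaned_music m)) := by
    intro ms
    induction ms with
    | nil => intro acc; simp
    | cons m ms ih =>
      intro acc
      simp only [List.foldl_cons, List.map_cons, ih]
      rw [PySem.List.foldl_append_if_eq_filter]
      simp [pvFilt]
  simpa using h pvMonths []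

theorem pvB_inv (ts : List (List Int)) :
    ∀ (g : Int → List (List Int)),
      ts.foldl pvBStep (pvMonths.map (fun m => (m, g m)))
        = pvMonths.map (fun m => (m, g m ++ pvFilt ts m)) := by
  induction ts with
  | nil => intro g; simp [pvFilt]
  | cons t ts ih =>
    intro g
    simp only [List.foldl_cons]
    cases h : PySem.List.pyGet? t (-2) with
    | none =>
      have hstep : pvBStep (pvMonths.map (fun m => (m, g m))) t
          = pvMonths.map (fun m => (m, g m)) := by
        simp [pvBStep, h]
      rw [hstep, ih g]
      refine List.map_congr_left ?_
      intro m _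
      simp [pvFilt, h]
    | some k =>
      by_cases hk : pvMonths.any (fun m => m == k)
      · have hstep : pvBStep (pvMonths.map (fun m => (m, g m))) t
            = pvMonths.map (fun m => (m, if m == k then g m ++ [t] else g m)) := by
          simp only [pvBStep, h, List.any_map]
          rw [if_pos (by simpa using hk)]
          simp only [List.map_map]
          refine List.map_congr_left ?_
          intro m _
          by_cases hm : m = k <;> simp [hm]
        rw [hstep,
          ih (fun m => if m == k then g m ++ [t] else g m)]
        refine List.map_congr_left ?_
        intro m _
        by_cases hm : m = k
        · subst hm; simp [pvFilt, h]
        · simp [pvFilt, h, hm, Ne.symm hm]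
      · have hstep : pvBStep (pvMonths.map (fun m => (m, g m))) t
            = pvMonths.map (fun m => (m, g m)) := by
          simp only [pvBStep, h, List.any_map]
          rw [if_neg (by simpa using hk)]
        rw [hstep, ih g]
        refine List.map_congr_left ?_
        intro m hm
        have hne : ¬ (k = m) := by
          intro he; subst he
          exact hk (List.any_of_mem hm (by simp))
        simp [pvFilt, h, hne]

theorem pvB_canon (cleaned_music : List (List Int)) :
    organize_by_month_alt cleaned_music = pvMonths.map (fun m => (m, pvFilt cleaned_music m)) := by
  unfold organize_by_month_alt
  simpa using pvB_inv cleaned_music (fun _ => [])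

-- ===== VERDICT (by name: the statement is the Claim_ definition above) =====
theorem organize_by_month_spec : Claim_equal_organize_by_month := by
  intro cleaned_music _ _
  unfold Spec_organize_by_month
  rw [pvA_canon, pvB_canon]
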